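-- pv_equiv track=rewrite | github.com/BenSparksCode/advent-of-code-2023 | 2023/Python/13.py | find_reflection_start
-- ===== SOURCE A (Python) =====
-- from typing import List
--
-- def find_reflection_start(scores: List[int]) -> int:
--     for i in range(1,len(scores)):
--         side1 = scores[:i][::-1]
--         side2 = scores[i:]
--         mirror = True
--         for j in range(min(len(side1), len(side2))):
--             if side1[j] != side2[j]:
--                 mirror = False
--                 break
--         if mirror: return i
--     return -1 # if no mirror found
-- ===== SOURCE B (Python) =====
-- from typing import List
--
-- def find_reflection_start(scores: List[int]) -> int:
--     # depth-major sieve: keep every candidate split point and filter all of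
--     # them simultaneously by increasing mirror depth j (candidate-major scan
--     # in A becomes depth-major staged filtering here)
--     n = len(scores)
--     cands = list(range(1, n))
--     for j in range(n):
--         if not cands:
--             return -1
--         cands = [i for i in cands
--                  if i - 1 - j < 0 or i + j >= n
--                  or scores[i - 1 - j] == scores[i + j]]
--     return cands[0] if cands else -1
-- ===== Notes on version B (the rewrite author's own statement) =====
-- stated objective: alternative
-- what changed: B replaces A's candidate-major scan (for each split point, compare a reversed prefix slice with the suffix) by a depth-major sieve: it keeps the whole list of candidate split points and filters all of them simultaneously by increasing mirror depth, returning the first survivor.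
import Mathlib
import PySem

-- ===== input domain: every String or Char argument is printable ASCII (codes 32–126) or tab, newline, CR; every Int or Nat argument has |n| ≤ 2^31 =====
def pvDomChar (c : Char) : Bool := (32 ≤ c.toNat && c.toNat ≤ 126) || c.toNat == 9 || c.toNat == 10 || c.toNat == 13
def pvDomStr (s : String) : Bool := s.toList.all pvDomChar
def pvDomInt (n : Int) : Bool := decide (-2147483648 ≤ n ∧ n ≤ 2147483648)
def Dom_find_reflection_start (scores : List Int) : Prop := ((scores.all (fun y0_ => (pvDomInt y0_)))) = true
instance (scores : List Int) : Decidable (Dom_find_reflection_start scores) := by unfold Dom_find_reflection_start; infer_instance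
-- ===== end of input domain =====

-- B replaces A's candidate-major scan (per split point, compare reversed prefix
-- slice with suffix) by a depth-major sieve that filters the whole candidate
-- list by increasing mirror depth (objective: alternative; same worst-case cost).

-- ===== PORT A =====
-- inner 'for j in range(min(len(side1),len(side2))): if side1[j] != side2[j]: break'
def pvLoopA : List Int → List Int → Bool
  | a :: as, b :: bs => if a ≠ b then false else pvLoopA as bs
  | _, _ => true

-- outer 'for i in range(1, len(scores))' with early return
def pvOuterA (scores : List Int) (i : Nat) : Int :=
  if _h : i < scores.length then
    let side1 := (PySem.List.slice scores none (some (i : Int))).reverse  -- scores[:i][::-1]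
    let side2 := PySem.List.slice scores (some (i : Int)) none            -- scores[i:]
    if pvLoopA side1 side2 then (i : Int) else pvOuterA scores (i + 1)
  else -1
termination_by scores.length - i

def find_reflection_start (scores : List Int) : Int := pvOuterA scores 1

-- ===== PORT B =====
-- the comprehension's condition: 'i - 1 - j < 0 or i + j >= n or scores[i-1-j] == scores[i+j]'
def pvCondB (scores : List Int) (n : Nat) (i j : Int) : Bool :=
  (i - 1 - j < 0) || ((n : Int) ≤ i + j) || (scores.getD (i - 1 - j).toNat 0 == scores.getD (i + j).toNat 0)

-- 'for j in range(n): if not cands: return -1; cands = [i for i in cands if …]'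
-- then 'return cands[0] if cands else -1'
def pvSieveB (scores : List Int) (n : Nat) (j : Nat) (cands : List Int) : Int :=
  if _h : j < n then
    if cands.isEmpty then -1
    else pvSieveB scores n (j + 1) (cands.filter (fun i => pvCondB scores n i (j : Int)))
  else match cands with
    | [] => -1
    | c :: _ => c
termination_by n - j

def find_reflection_start_alt (scores : List Int) : Int :=
  pvSieveB scores scores.length 0 (PySem.List.pyRange 1 (scores.length : Int) 1)

-- ===== PRECONDITION & SPEC =====
def Spec_find_reflection_start (scores : List Int) (out : Int) : Prop := out = find_reflection_start_alt scores
instance (scores : List Int) (out : Int) : Decidable (Spec_find_reflection_start scores out) := by unfold Spec_find_reflection_start; infer_instance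

-- ===== CLAIM (what is proved, stated in full; the proofs are below) =====
def Claim_equal_find_reflection_start : Prop := ∀ (scores : List Int), Dom_find_reflection_start scores → Spec_find_reflection_start scores (find_reflection_start scores)

-- ===== LEMMAS AND PROOFS =====

-- proof-only abbreviations for the two filter tests
def pvPredA (scores : List Int) (c : Nat) : Bool :=
  pvLoopA ((PySem.List.slice scores none (some (c : Int))).reverse)
          (PySem.List.slice scores (some (c : Int)) none)

def pvPredB (scores : List Int) (c : Nat) : Bool :=
  (List.range' 0 scores.length).all (fun j' => pvCondB scores scores.length (c : Int) (j' : Int))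

-- A's pairwise walk succeeds iff all in-range pairs agree
theorem pvLoopA_iff (as : List Int) : ∀ (bs : List Int),
    pvLoopA as bs = true ↔ ∀ j, j < min as.length bs.length → as.getD j 0 = bs.getD j 0 := by
  induction as with
  | nil => intro bs; simp [pvLoopA]
  | cons a as ih =>
    intro bs
    cases bs with
    | nil => simp [pvLoopA]
    | cons b bs =>
      simp only [pvLoopA]
      constructor
      · intro h j hj
        split at h
        · exact absurd h (by simp)
        · rename_i hab
          cases j with
          | zero => simpa using not_not.mp hab
          | succ j =>
            have := (ih bs).mp h j (by simp at hj ⊢; omega)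
            simpa using this
      · intro h
        have hab : a = b := by simpa using h 0 (by simp)
        rw [if_neg (by simp [hab])]
        exact (ih bs).mpr (fun j hj => by
          have := h (j + 1) (by simp at hj ⊢; omega)
          simpa using this)

-- the sieve equals: filter the candidates by "all remaining depths", take head
theorem pvSieveB_eq (scores : List Int) (n : Nat) : ∀ (k j : Nat) (cands : List Int), n ≤ j + k →
    pvSieveB scores n j cands
      = (cands.filter (fun i => (List.range' j (n - j)).all (fun j' => pvCondB scores n i (j' : Int)))).headD (-1) := by
  intro k
  induction k with
  | zero =>
    intro j cands hk
    unfold pvSieveB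
    rw [dif_neg (by omega)]
    have : n - j = 0 := by omega
    rw [this]
    simp only [List.range'_zero, List.all_nil, List.filter_true]
    cases cands <;> rfl
  | succ k ih =>
    intro j cands hk
    unfold pvSieveB
    split
    · rename_i hj
      have hrange : List.range' j (n - j) = j :: List.range' (j + 1) (n - (j + 1)) := by
        have h1 : n - j = (n - (j + 1)) + 1 := by omega
        rw [h1, List.range'_succ]
      split
      · rename_i he
        rw [List.isEmpty_iff] at he
        subst he
        simp
      · rw [ih (j + 1) _ (by omega), hrange]
        rw [List.filter_filter]
        congr 1
        apply List.filter_congr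
        intro i _
        simp only [List.all_cons]
        rw [Bool.and_comm]
    · rename_i hj
      have : n - j = 0 := by omega
      rw [this]
      simp only [List.range'_zero, List.all_nil, List.filter_true]
      cases cands <;> rfl

-- A's outer loop equals: filter the remaining candidates by the mirror test, take first
theorem pvOuterA_eq (scores : List Int) : ∀ (k i : Nat), scores.length ≤ i + k →
    pvOuterA scores i
      = (match (List.range' i (scores.length - i)).filter (pvPredA scores) with
         | [] => (-1 : Int)
         | c :: _ => (c : Int)) := by
  intro k
  induction k with
  | zero =>
    intro i hk
    unfold pvOuterA
    rw [dif_neg (by omega)]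
    have : scores.length - i = 0 := by omega
    rw [this, List.range'_zero, List.filter_nil]
  | succ k ih =>
    intro i hk
    unfold pvOuterA
    split
    · rename_i hi
      have hrange : List.range' i (scores.length - i) = i :: List.range' (i + 1) (scores.length - (i + 1)) := by
        have h1 : scores.length - i = (scores.length - (i + 1)) + 1 := by omega
        rw [h1, List.range'_succ]
      rw [hrange, List.filter_cons]
      by_cases hm : pvPredA scores i
      · rw [if_pos (by simpa [pvPredA, PySem.List.slice_to_natCast, PySem.List.slice_from_natCast] using hm)]
        rw [if_pos hm]
      · rw [if_neg (by simpa [pvPredA, PySem.List.slice_to_natCast, PySem.List.slice_from_natCast] using hm)]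
        rw [if_neg hm]
        exact ih (i + 1) (by omega)
    · rename_i hi
      have : scores.length - i = 0 := by omega
      rw [this, List.range'_zero, List.filter_nil]

-- bridge: for a candidate 1 ≤ c < n, A's mirror test equals B's all-depths test
theorem pvMirror_eq_all (scores : List Int) (c : Nat) (hc1 : 1 ≤ c) (hcn : c < scores.length) :
    pvPredA scores c = pvPredB scores c := by
  set n := scores.length with hn
  unfold pvPredA pvPredB
  rw [PySem.List.slice_to_natCast scores c, PySem.List.slice_from_natCast scores c]
  rw [Bool.eq_iff_iff, pvLoopA_iff, List.all_eq_true]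
  have hlen1 : (scores.take c).reverse.length = c := by
    simp [List.length_take]; omega
  have hlen2 : (scores.drop c).length = n - c := by
    simp only [List.length_drop]
    omega
  have hget1 : ∀ j, j < c → (scores.take c).reverse.getD j 0 = scores.getD (c - 1 - j) 0 := by
    intro j hj
    have hj' : j < (scores.take c).reverse.length := by omega
    have hcj : c - 1 - j < n := by omega
    rw [List.getD_eq_getElem _ _ hj', List.getD_eq_getElem _ _ hcj]
    rw [List.getElem_reverse]
    simp only [List.getElem_take]
    congr 1
    simp [List.length_take]; omega
  have hget2 : ∀ j, j < n - c → (scores.drop c).getD j 0 = scores.getD (c + j) 0 := by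
    intro j hj
    rw [List.getD_eq_getElem _ _ (by omega : j < (scores.drop c).length),
        List.getD_eq_getElem _ _ (by omega : c + j < n)]
    simp
  constructor
  · intro h j' hj'
    have hj'n : j' < n := by
      have := List.mem_range'_1.mp hj'
      omega
    unfold pvCondB
    simp only [Bool.or_eq_true, decide_eq_true_eq, beq_iff_eq]
    by_cases h1 : (c : Int) - 1 - (j' : Int) < 0
    · exact Or.inl (Or.inl h1)
    · by_cases h2 : (n : Int) ≤ (c : Int) + (j' : Int)
      · exact Or.inl (Or.inr h2)
      · have hj'c : j' < c := by omega
        have hj'nc : j' < n - c := by omega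
        have heq := h j' (by rw [hlen1, hlen2]; omega)
        rw [hget1 j' hj'c, hget2 j' hj'nc] at heq
        have e1 : ((c : Int) - 1 - (j' : Int)).toNat = c - 1 - j' := by omega
        have e2 : ((c : Int) + (j' : Int)).toNat = c + j' := by omega
        rw [e1, e2]
        exact Or.inr heq
  · intro h j hj
    rw [hlen1, hlen2] at hj
    have hjc : j < c := by omega
    have hjnc : j < n - c := by omega
    have hmem := h j (List.mem_range'_1.mpr (by omega))
    unfold pvCondB at hmem
    simp only [Bool.or_eq_true, decide_eq_true_eq, beq_iff_eq] at hmem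
    have e1 : ((c : Int) - 1 - (j : Int)).toNat = c - 1 - j := by omega
    have e2 : ((c : Int) + (j : Int)).toNat = c + j := by omega
    rw [e1, e2] at hmem
    rw [hget1 j hjc, hget2 j hjnc]
    rcases hmem with (h1 | h2) | heq
    · omega
    · omega
    · exact heq

-- the candidate list B starts from is the Int image of A's index range
theorem pyRange_one_n (n : Nat) :
    PySem.List.pyRange 1 (n : Int) 1 = (List.range' 1 (n - 1)).map (fun c : Nat => (c : Int)) := by
  rw [PySem.List.pyRange_one, List.range'_eq_map_range]
  rw [List.map_map]
  have : ((n : Int) - 1).toNat = n - 1 := by omega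
  rw [this]
  apply List.map_congr_left
  intro k _
  simp only [Function.comp_apply]
  push_cast
  ring

-- ===== VERDICT (by name: the statement is the Claim_ definition above) =====
theorem find_reflection_start_spec : Claim_equal_find_reflection_start := by
  intro scores _
  unfold Spec_find_reflection_start find_reflection_start find_reflection_start_alt
  rw [pvOuterA_eq scores scores.length 1 (by omega)]
  rw [pvSieveB_eq scores scores.length scores.length 0 _ (by omega)]
  rw [pyRange_one_n scores.length, List.filter_map]
  have hfc : (List.range' 1 (scores.length - 1)).filter
        ((fun i => (List.range' 0 (scores.length - 0)).all
            (fun j' => pvCondB scores scores.length i (j' : Int))) ∘ (fun c : Nat => (c : Int)))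
      = (List.range' 1 (scores.length - 1)).filter (pvPredA scores) := by
    apply List.filter_congr
    intro c hc
    have hm := List.mem_range'_1.mp hc
    have := pvMirror_eq_all scores c (by omega) (by omega)
    unfold pvPredB at this
    simpa using this.symm
  rw [hfc]
  cases (List.range' 1 (scores.length - 1)).filter (pvPredA scores) <;> rfl
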